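-- pv_equiv track=rewrite | github.com/jonez734/bbsengine5 | py/bbsengine5.py | oldrangecollapse
-- ===== SOURCE A (Python) =====
-- def oldrangecollapse(elle:list) -> str:
--     def chunk(elle):
--         ret = [elle[0],]
--         for i in elle[1:]:
--             if ord(i) == ord(ret[-1]) + 1:
--                 pass
--             else:
--                 yield ret
--                 ret = []
--             ret.append(i)
--         yield ret
--     chunked = chunk(elle)
--     ranges = ((min(l), max(l)) for l in chunked)
--     return ", ".join("{0}-{1}".format(*l) if l[0] != l[1] else l[0] for l in ranges)
-- ===== SOURCE B (Python) =====
-- def oldrangecollapse(elle: list) -> str: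
--     # Staged index-based passes: first compute the list of break positions
--     # (indices whose character does not extend the previous one by +1), then
--     # format each [start, end) segment directly from its two endpoints.
--     n = len(elle)
--     breaks = [i for i in range(1, n) if ord(elle[i]) != ord(elle[i - 1]) + 1]
--     bounds = [0] + breaks + [n]
--     parts = []
--     for s, e in zip(bounds, bounds[1:]):
--         first, last = elle[s], elle[e - 1]
--         parts.append(first if first == last else "{0}-{1}".format(first, last))
--     return ", ".join(parts)
-- ===== Notes on version B (the rewrite author's own statement) =====
-- stated objective: alternative
-- what changed: A streams the list once through a generator that accumulates chunk lists and scans each with min()/max(); B instead works in staged index passes: it first computes the list of break positions by a range filter over adjacent index pairs, then formats each [start,end) segment directly from its two endpoint lookups, with no running group accumulator.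
import Mathlib
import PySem

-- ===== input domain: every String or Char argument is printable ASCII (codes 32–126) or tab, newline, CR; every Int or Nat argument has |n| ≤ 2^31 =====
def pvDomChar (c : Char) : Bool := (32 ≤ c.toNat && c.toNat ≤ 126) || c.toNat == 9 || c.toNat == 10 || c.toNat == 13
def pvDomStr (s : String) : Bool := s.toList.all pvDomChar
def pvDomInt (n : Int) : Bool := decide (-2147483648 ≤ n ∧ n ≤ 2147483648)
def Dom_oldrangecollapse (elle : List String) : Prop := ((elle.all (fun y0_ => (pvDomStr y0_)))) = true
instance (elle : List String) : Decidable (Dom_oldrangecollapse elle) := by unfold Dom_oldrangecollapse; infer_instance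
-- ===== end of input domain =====

-- B replaces A's generator of chunk lists + min()/max() scans by staged index passes:
-- a range filter computing break positions, then endpoint lookups per segment
-- (objective: alternative). Neither mutates its argument.

-- ===== PORT A =====
-- ord(s) for a one-char string; Python's ord raises TypeError on other strings — every input
-- reaching an ord() call with a non-one-char string is excluded by Pre_ (A raises there).
def pyOrd (s : String) : Int :=
  match s.toList with
  | [c] => (c.toNat : Int)
  | _ => 0

-- the inner generator 'chunk': ret is the current chunk, yields completed chunks
def chunkA (ret : List String) : List String → List (List String)
  | [] => [ret]
  | i :: rest =>
      if pyOrd i = pyOrd (ret.getLastD "") + 1 then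
        chunkA (ret ++ [i]) rest
      else
        ret :: chunkA [i] rest

-- (min(l), max(l)) of a chunk (Python min/max on strings; chunks are nonempty, so getD is unused)
def toPairA (l : List String) : String × String :=
  ((PySem.List.min? l (fun y => y)).getD "", (PySem.List.max? l (fun y => y)).getD "")

def oldrangecollapse (elle : List String) : String :=
  match elle with
  | [] => ""  -- Python raises IndexError on elle[0]; excluded by Pre_
  | x :: rest =>
      let chunked := chunkA [x] rest
      let ranges := chunked.map toPairA
      PySem.Str.join ", " (ranges.map (fun l => if l.1 ≠ l.2 then l.1 ++ "-" ++ l.2 else l.1))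

-- ===== PORT B =====
-- Source B step for step; elle[i] is rendered with pyGetD (every index Source B uses is in range on
-- Pre_; on the empty list Source B raises IndexError, excluded by Pre_).
def oldrangecollapse_alt (elle : List String) : String :=
  let n : Int := elle.length
  let breaks := (PySem.List.pyRange 1 n 1).filter
    (fun i => pyOrd (PySem.List.pyGetD elle i "") ≠ pyOrd (PySem.List.pyGetD elle (i - 1) "") + 1)
  let bounds := 0 :: (breaks ++ [n])
  let parts := (bounds.zip bounds.tail).map (fun se =>
    let first := PySem.List.pyGetD elle se.1 ""
    let last := PySem.List.pyGetD elle (se.2 - 1) ""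
    if first = last then first else first ++ "-" ++ last)
  PySem.Str.join ", " parts

-- ===== PRECONDITION & SPEC =====
-- Pre_ excludes exactly the inputs where A raises: the empty list (IndexError on elle[0]) and
-- lists of length ≥ 2 containing a non-one-char string (TypeError from ord); a singleton list
-- never reaches ord, so any single string is admitted.
def Pre_oldrangecollapse (elle : List String) : Prop :=
  elle ≠ [] ∧ (elle.length = 1 ∨ ∀ s ∈ elle, s.toList.length = 1)
instance (elle : List String) : Decidable (Pre_oldrangecollapse elle) := by
  unfold Pre_oldrangecollapse; infer_instance

def pvWitness_oldrangecollapse : List String := ["a", "b", "d"]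

def Spec_oldrangecollapse (elle : List String) (out : String) : Prop := out = oldrangecollapse_alt elle
instance (elle : List String) (out : String) : Decidable (Spec_oldrangecollapse elle out) := by
  unfold Spec_oldrangecollapse; infer_instance

-- ===== CLAIM (what is proved, stated in full; the proofs are below) =====
def Claim_equal_oldrangecollapse : Prop := ∀ (elle : List String), Dom_oldrangecollapse elle → Pre_oldrangecollapse elle → Spec_oldrangecollapse elle (oldrangecollapse elle)

-- ===== LEMMAS AND PROOFS =====

-- common intermediate: the (first,last) pairs of the maximal +1-runs, computed recursively
def segs (f prev : String) : List String → List (String × String)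
  | [] => [(f, prev)]
  | ch :: rest =>
      if pyOrd ch = pyOrd prev + 1 then segs f ch rest
      else (f, prev) :: segs ch ch rest

theorem single_lt (s t : String) (a b : Char) (hs : s.toList = [a]) (ht : t.toList = [b])
    (h : a.toNat < b.toNat) : s < t := by
  rw [String.lt_iff_toList_lt, hs, ht]
  exact List.Lex.rel (by simpa [Char.lt_def] using h)

theorem lt_of_pyOrd_succ (l ch : String) (hl : l.toList.length = 1) (hch : ch.toList.length = 1)
    (h : pyOrd ch = pyOrd l + 1) : l < ch := by
  obtain ⟨a, ha⟩ : ∃ a, l.toList = [a] := by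
    cases hL : l.toList with
    | nil => simp [hL] at hl
    | cons a t => cases t with
      | nil => exact ⟨a, rfl⟩
      | cons b t' => simp [hL] at hl
  obtain ⟨b, hb⟩ : ∃ b, ch.toList = [b] := by
    cases hL : ch.toList with
    | nil => simp [hL] at hch
    | cons a t => cases t with
      | nil => exact ⟨a, rfl⟩
      | cons b t' => simp [hL] at hch
  refine single_lt l ch a b ha hb ?_
  simp [pyOrd, ha, hb] at h
  omega

-- A-side: chunkA's chunks, scanned with min/max, are exactly segs
theorem chunkA_eq_segs (rest : List String) : ∀ (ret : List String) (f l : String),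
    (∀ s ∈ rest, s.toList.length = 1) →
    PySem.List.min? ret (fun y => y) = some f →
    PySem.List.max? ret (fun y => y) = some l →
    ret.getLastD "" = l →
    l.toList.length = 1 →
    (chunkA ret rest).map toPairA = segs f l rest := by
  induction rest with
  | nil =>
      intro ret f l _ hmin hmax _ _
      simp [chunkA, toPairA, segs, hmin, hmax]
  | cons ch rest ih =>
      intro ret f l hsingle hmin hmax hlast hl1
      have hch1 : ch.toList.length = 1 := hsingle ch (by simp)
      have hrest : ∀ s ∈ rest, s.toList.length = 1 := fun s hs => hsingle s (by simp [hs])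
      cases ret with
      | nil => simp [PySem.List.min?] at hmin
      | cons r0 rt =>
        have hminf : rt.foldl min r0 = f := by
          have := PySem.List.min?_id_cons r0 rt
          rw [this] at hmin; exact Option.some_injective _ hmin
        have hmaxl : rt.foldl max r0 = l := by
          have := PySem.List.max?_id_cons r0 rt
          rw [this] at hmax; exact Option.some_injective _ hmax
        have hfl : f ≤ l := by
          have hfm : f ∈ r0 :: rt := PySem.List.min?_mem hmin
          exact PySem.List.max?_isMax hmax f hfm
        have hlast' : (r0 :: rt).getLast?.getD "" = l := by simpa using hlast
        by_cases hc : pyOrd ch = pyOrd l + 1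
        · have hlch : l < ch := lt_of_pyOrd_succ l ch hl1 hch1 hc
          have hchunk : chunkA (r0 :: rt) (ch :: rest) = chunkA ((r0 :: rt) ++ [ch]) rest := by
            simp [chunkA, hlast', hc]
          rw [hchunk, show segs f l (ch :: rest) = segs f ch rest by simp [segs, hc]]
          refine ih ((r0 :: rt) ++ [ch]) f ch hrest ?_ ?_ ?_ hch1
          · rw [show (r0 :: rt) ++ [ch] = r0 :: (rt ++ [ch]) by simp,
              PySem.List.min?_id_cons, List.foldl_append]
            simp [hminf, min_eq_left (le_of_lt (lt_of_le_of_lt hfl hlch))]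
          · rw [show (r0 :: rt) ++ [ch] = r0 :: (rt ++ [ch]) by simp,
              PySem.List.max?_id_cons, List.foldl_append]
            simp [hmaxl, max_eq_right (le_of_lt hlch)]
          · show ((r0 :: rt) ++ [ch]).getLastD "" = ch
            rw [List.getLastD_eq_getLast?, List.getLast?_concat]
            rfl
        · have hchunk : chunkA (r0 :: rt) (ch :: rest) = (r0 :: rt) :: chunkA [ch] rest := by
            simp [chunkA, hlast', hc]
          rw [hchunk, show segs f l (ch :: rest) = (f, l) :: segs ch ch rest by simp [segs, hc]]
          rw [List.map_cons,
            ih [ch] ch ch hrest (by simp [PySem.List.min?_id_cons])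
              (by simp [PySem.List.max?_id_cons]) (by simp) hch1]
          simp [toPairA, hmin, hmax]

-- B-side: notation for the port's pieces
def getE (elle : List String) (i : Int) : String := PySem.List.pyGetD elle i ""

def brkP (elle : List String) (i : Int) : Bool :=
  pyOrd (getE elle i) ≠ pyOrd (getE elle (i - 1)) + 1

-- the pairs (start, end) of B, starting the current run at index s with the cursor at k
theorem zip_segs (elle : List String) : ∀ (t : List String) (s k : Nat),
    k < elle.length → elle.drop (k + 1) = t →
    (((s : Int) :: ((PySem.List.pyRange ((k:Int) + 1) elle.length 1).filter (brkP elle)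
        ++ [(elle.length : Int)])).zip
      (((PySem.List.pyRange ((k:Int) + 1) elle.length 1).filter (brkP elle)
        ++ [(elle.length : Int)]))).map
      (fun se => (getE elle se.1, getE elle (se.2 - 1)))
    = segs (getE elle s) (getE elle k) t := by
  intro t
  induction t with
  | nil =>
      intro s k hk hdrop
      have hkn : k + 1 = elle.length := by
        have := List.drop_eq_nil_iff.mp hdrop; omega
      have hrange : PySem.List.pyRange ((k:Int) + 1) elle.length 1 = [] := by
        apply PySem.List.pyRange_one_eq_nil; omega
      rw [hrange]
      have hsub : ((elle.length : Int) - 1) = (k : Int) := by omega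
      simp only [List.filter_nil, List.nil_append, List.zip_cons_cons, List.zip_nil_right,
        List.map_cons, List.map_nil, segs, hsub]
  | cons ch tail ih =>
      intro s k hk hdrop
      have hch : elle[k + 1]? = some ch := by
        have h0 : (elle.drop (k + 1))[0]? = some ch := by rw [hdrop]; rfl
        rwa [List.getElem?_drop, Nat.add_zero] at h0
      have hk1 : k + 1 < elle.length := (List.getElem?_eq_some_iff.mp hch).1
      have hgetk1 : getE elle ((k:Int) + 1) = ch := by
        have : ((k:Int) + 1) = ((k + 1 : Nat) : Int) := by push_cast; ring
        rw [this, getE, PySem.List.pyGetD_natCast, List.getD, hch]; rfl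
      have hdrop' : elle.drop (k + 1 + 1) = tail := by
        rw [← List.tail_drop, hdrop]; rfl
      have hcons : PySem.List.pyRange ((k:Int) + 1) elle.length 1
          = ((k:Int) + 1) :: PySem.List.pyRange ((k:Int) + 1 + 1) elle.length 1 := by
        apply PySem.List.pyRange_one_cons; omega
      have hsub : ((k:Int) + 1 - 1) = (k:Int) := by ring
      by_cases hP : brkP elle ((k:Int) + 1) = true
      · -- break at k+1: close (s, k), restart at k+1
        rw [hcons, List.filter_cons_of_pos hP]
        have hne : ¬ pyOrd ch = pyOrd (getE elle k) + 1 := by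
          simp only [brkP, hgetk1, hsub, ne_eq, decide_eq_true_eq] at hP
          exact hP
        simp only [List.cons_append, List.zip_cons_cons, List.map_cons]
        rw [hsub]
        have hih := ih (k + 1) (k + 1) hk1 hdrop'
        rw [show ((k + 1 : Nat) : Int) = (k:Int) + 1 from by push_cast; ring] at hih
        rw [hih, hgetk1,
          show segs (getE elle s) (getE elle k) (ch :: tail)
              = (getE elle s, getE elle k) :: segs ch ch tail from by simp [segs, hne]]
      · -- run continues through k+1
        rw [hcons, List.filter_cons_of_neg hP]
        have heq : pyOrd ch = pyOrd (getE elle k) + 1 := by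
          simp only [Bool.not_eq_true] at hP
          simp only [brkP, hgetk1, hsub, ne_eq, decide_eq_false_iff_not, not_not] at hP
          exact hP
        have hih := ih s (k + 1) hk1 hdrop'
        rw [show ((k + 1 : Nat) : Int) = (k:Int) + 1 from by push_cast; ring] at hih
        rw [hih, hgetk1]
        simp [segs, heq]

theorem render_eq (p : String × String) :
    (if p.1 ≠ p.2 then p.1 ++ "-" ++ p.2 else p.1) = (if p.1 = p.2 then p.1 else p.1 ++ "-" ++ p.2) := by
  by_cases h : p.1 = p.2 <;> simp [h]

-- ===== VERDICT (by name: the statement is the Claim_ definition above) =====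
theorem oldrangecollapse_spec : Claim_equal_oldrangecollapse := by
  unfold Claim_equal_oldrangecollapse
  intro elle _ hpre
  obtain ⟨hne, hshape⟩ := hpre
  unfold Spec_oldrangecollapse
  cases elle with
  | nil => exact absurd rfl hne
  | cons x rest =>
    rcases hshape with h1 | hall
    · -- singleton list: both return x
      have hrest : rest = [] := by simpa using h1
      subst hrest
      simp [oldrangecollapse, oldrangecollapse_alt, chunkA, toPairA,
        PySem.List.min?_id_cons, PySem.List.max?_id_cons,
        PySem.List.pyRange_one_eq_nil, PySem.List.pyGetD_zero_cons]
    · -- all one-char strings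
      have hx1 : x.toList.length = 1 := hall x (by simp)
      have hrest : ∀ s ∈ rest, s.toList.length = 1 := fun s hs => hall s (by simp [hs])
      have hA : (chunkA [x] rest).map toPairA = segs x x rest :=
        chunkA_eq_segs rest [x] x x hrest (by simp [PySem.List.min?_id_cons])
          (by simp [PySem.List.max?_id_cons]) (by simp) hx1
      have hB := zip_segs (x :: rest) rest 0 0 (by simp) (by simp)
      simp only [Nat.cast_zero, zero_add] at hB
      rw [show getE (x :: rest) 0 = x from by simp [getE, PySem.List.pyGetD_zero_cons]] at hB
      show PySem.Str.join ", " (((chunkA [x] rest).map toPairA).map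
            (fun l => if l.1 ≠ l.2 then l.1 ++ "-" ++ l.2 else l.1))
          = oldrangecollapse_alt (x :: rest)
      rw [hA]
      show PySem.Str.join ", "
            ((segs x x rest).map (fun l => if l.1 ≠ l.2 then l.1 ++ "-" ++ l.2 else l.1))
          = PySem.Str.join ", " (List.map
              ((fun p : String × String => if p.1 = p.2 then p.1 else p.1 ++ "-" ++ p.2) ∘
               (fun se : Int × Int => (getE (x :: rest) se.1, getE (x :: rest) (se.2 - 1))))
              (((0 : Int) :: ((PySem.List.pyRange 1 ((x :: rest).length : Int) 1).filter
                    (brkP (x :: rest)) ++ [((x :: rest).length : Int)])).zip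
                ((PySem.List.pyRange 1 ((x :: rest).length : Int) 1).filter
                    (brkP (x :: rest)) ++ [((x :: rest).length : Int)])))
      rw [← List.map_map, hB]
      congr 1
      apply List.map_congr_left
      intro p _
      exact render_eq p
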